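-- pv_equiv track=rewrite | github.com/Juan-C-Hernandez/Practica3-ReconocimientoPatrones | prueba.py | correlacion_corta
-- ===== SOURCE A (Python) =====
-- def correlacion_corta(vector_a):
--     ra = []
--     for i in range(0, len(vector_a)-1):
--         rai = 0
--         for j in range(0, len(vector_a)-1-i):
--             rai = rai + vector_a[j] * vector_a[j+i]
--         ra.append(rai)
--     return ra
-- ===== SOURCE B (Python) =====
-- def correlacion_corta(vector_a):
--     n = len(vector_a)
--     ra = [0] * (n - 1)
--     for j in range(n - 1):
--         aj = vector_a[j]
--         for k in range(j, n - 1):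
--             ra[k - j] += aj * vector_a[k]
--     return ra
-- ===== Notes on version B (the rewrite author's own statement) =====
-- stated objective: alternative
-- what changed: Replaced the per-lag gather (recomputing each lag's sum independently) by a scatter over index pairs that distributes each product a[j]*a[k] into the lag bucket k-j of a preallocated result array.
import Mathlib
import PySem

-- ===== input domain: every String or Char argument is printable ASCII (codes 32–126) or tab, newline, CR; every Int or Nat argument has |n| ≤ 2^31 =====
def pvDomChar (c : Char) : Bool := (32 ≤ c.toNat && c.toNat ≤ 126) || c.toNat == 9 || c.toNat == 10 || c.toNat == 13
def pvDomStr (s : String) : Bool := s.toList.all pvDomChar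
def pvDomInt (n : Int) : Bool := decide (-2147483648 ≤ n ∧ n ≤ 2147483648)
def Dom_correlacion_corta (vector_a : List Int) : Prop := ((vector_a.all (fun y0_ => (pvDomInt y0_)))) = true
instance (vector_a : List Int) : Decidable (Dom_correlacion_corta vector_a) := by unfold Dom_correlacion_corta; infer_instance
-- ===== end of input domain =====

-- B replaces A's per-lag gather by a scatter of each product a[j]*a[k] into lag bucket k-j
-- (objective: alternative decomposition, same O(n^2) cost). Both programs are total.

-- ===== PORT A =====
-- all list indices are provably in range, so v[j] is ported as getD (never hit the default)
def correlacion_corta (vector_a : List Int) : List Int :=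
  (List.range (vector_a.length - 1)).foldl
    (fun ra i =>
      ra ++ [(List.range (vector_a.length - 1 - i)).foldl
        (fun rai j => rai + vector_a.getD j 0 * vector_a.getD (j + i) 0) 0])
    []

-- ===== PORT B =====
-- ra[k-j] += aj * vector_a[k]  is ported as  set (k-j) (getD (k-j) + aj * getD k); indices in range
def correlacion_corta_alt (vector_a : List Int) : List Int :=
  (List.range (vector_a.length - 1)).foldl
    (fun ra j =>
      (List.range' j (vector_a.length - 1 - j)).foldl
        (fun ra k => ra.set (k - j) (ra.getD (k - j) 0 + vector_a.getD j 0 * vector_a.getD k 0)) ra)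
    (List.replicate (vector_a.length - 1) 0)

-- ===== PRECONDITION & SPEC =====
def Spec_correlacion_corta (vector_a : List Int) (out : List Int) : Prop := out = correlacion_corta_alt vector_a
instance (vector_a : List Int) (out : List Int) : Decidable (Spec_correlacion_corta vector_a out) := by unfold Spec_correlacion_corta; infer_instance

-- ===== CLAIM (what is proved, stated in full; the proofs are below) =====
def Claim_equal_correlacion_corta : Prop := ∀ (vector_a : List Int), Dom_correlacion_corta vector_a → Spec_correlacion_corta vector_a (correlacion_corta vector_a)

-- ===== LEMMAS AND PROOFS =====

-- the per-lag sum A computes for lag i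
def pvLagSum (v : List Int) (i : Nat) (m : Nat) : Int :=
  (List.range m).foldl (fun rai j => rai + v.getD j 0 * v.getD (j + i) 0) 0

theorem pvFoldlAppendMap (f : Nat → Int) (l : List Nat) (init : List Int) :
    l.foldl (fun acc i => acc ++ [f i]) init = init ++ l.map f := by
  induction l generalizing init with
  | nil => simp
  | cons x xs ih => simp [List.foldl_cons, ih]

theorem pvPortA_eq_map (v : List Int) :
    correlacion_corta v
      = (List.range (v.length - 1)).map (fun i => pvLagSum v i (v.length - 1 - i)) := by
  unfold correlacion_corta pvLagSum
  rw [pvFoldlAppendMap]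
  simp

-- inner scatter loop: positions s-j … s-j+len-1 each get the product for their lag added
theorem pvInner (v : List Int) (j : Nat) :
    ∀ (len s : Nat) (ra : List Int), j ≤ s → (s - j) + len ≤ ra.length →
      (((List.range' s len).foldl
          (fun ra k => ra.set (k - j) (ra.getD (k - j) 0 + v.getD j 0 * v.getD k 0)) ra).length
        = ra.length)
      ∧ ∀ p, ((List.range' s len).foldl
          (fun ra k => ra.set (k - j) (ra.getD (k - j) 0 + v.getD j 0 * v.getD k 0)) ra)[p]?
        = if s - j ≤ p ∧ p < s - j + len
            then some (ra.getD p 0 + v.getD j 0 * v.getD (j + p) 0)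
            else ra[p]? := by
  intro len
  induction len with
  | zero =>
    intro s ra _ _
    refine ⟨by simp, fun p => ?_⟩
    simp only [List.range'_zero, List.foldl_nil]
    rw [if_neg (by omega)]
  | succ len ih =>
    intro s ra hjs hlen
    have hset : s - j < ra.length := by omega
    set ra' := ra.set (s - j) (ra.getD (s - j) 0 + v.getD j 0 * v.getD s 0) with hra'
    have hlen' : ra'.length = ra.length := by simp [hra']
    have hrec := ih (s + 1) ra' (by omega) (by omega)
    have hstep : List.range' s (len + 1) = s :: List.range' (s + 1) len := by
      simp [List.range'_succ]
    refine ⟨?_, fun p => ?_⟩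
    · rw [hstep]; simp only [List.foldl_cons]
      rw [← hra']; rw [hrec.1, hlen']
    · rw [hstep]; simp only [List.foldl_cons]
      rw [← hra', hrec.2 p]
      by_cases hp0 : p = s - j
      · subst hp0
        rw [if_neg (by omega), if_pos (by omega)]
        have hs : j + (s - j) = s := by omega
        simp [hra', hset, hs]
      · have hne : s - j ≠ p := fun h => hp0 h.symm
        by_cases hin : s + 1 - j ≤ p ∧ p < s + 1 - j + len
        · rw [if_pos hin, if_pos (by omega)]
          have : ra'.getD p 0 = ra.getD p 0 := by
            simp [hra', List.getD, List.getElem?_set_ne hne]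
          rw [this]
        · rw [if_neg hin, if_neg (by omega)]
          simp [hra', List.getElem?_set_ne hne]

-- outer loop invariant: after the first m source indices, bucket p holds the partial lag-p sum
theorem pvOuter (v : List Int) (m : Nat) :
    (((List.range m).foldl
        (fun ra j =>
          (List.range' j (v.length - 1 - j)).foldl
            (fun ra k => ra.set (k - j) (ra.getD (k - j) 0 + v.getD j 0 * v.getD k 0)) ra)
        (List.replicate (v.length - 1) 0)).length = v.length - 1)
    ∧ ∀ p, p < v.length - 1 →
      ((List.range m).foldl
        (fun ra j =>
          (List.range' j (v.length - 1 - j)).foldl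
            (fun ra k => ra.set (k - j) (ra.getD (k - j) 0 + v.getD j 0 * v.getD k 0)) ra)
        (List.replicate (v.length - 1) 0)).getD p 0
        = pvLagSum v p (min m (v.length - 1 - p)) := by
  induction m with
  | zero =>
    refine ⟨by simp, fun p hp => ?_⟩
    simp [pvLagSum, List.getD]
  | succ m ih =>
    have hstep : List.range (m + 1) = List.range m ++ [m] := List.range_succ
    set acc := (List.range m).foldl
        (fun ra j =>
          (List.range' j (v.length - 1 - j)).foldl
            (fun ra k => ra.set (k - j) (ra.getD (k - j) 0 + v.getD j 0 * v.getD k 0)) ra)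
        (List.replicate (v.length - 1) 0) with hacc
    have hinner := pvInner v m (v.length - 1 - m) m acc (le_refl m) (by omega)
    rw [hstep]
    simp only [List.foldl_append, List.foldl_cons, List.foldl_nil, ← hacc]
    refine ⟨by rw [hinner.1, ih.1], fun p hp => ?_⟩
    have hget := hinner.2 p
    have hlen : acc.length = v.length - 1 := ih.1
    by_cases hin : p < v.length - 1 - m
    · rw [if_pos (by omega)] at hget
      have : min (m + 1) (v.length - 1 - p) = m + 1 := by omega
      rw [this]
      have hmin : min m (v.length - 1 - p) = m := by omega
      rw [List.getD, hget]
      simp only [Option.getD_some]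
      rw [ih.2 p hp, hmin, pvLagSum, pvLagSum, List.range_succ, List.foldl_append,
        List.foldl_cons, List.foldl_nil]
    · rw [if_neg (by omega)] at hget
      have hmin : min (m + 1) (v.length - 1 - p) = min m (v.length - 1 - p) := by omega
      rw [List.getD, hget, ← List.getD, ih.2 p hp, hmin]

theorem pvPortB_eq_map (v : List Int) :
    correlacion_corta_alt v
      = (List.range (v.length - 1)).map (fun i => pvLagSum v i (v.length - 1 - i)) := by
  have h := pvOuter v (v.length - 1)
  unfold correlacion_corta_alt
  apply List.ext_getElem
  · rw [h.1]; simp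
  · intro p hp1 hp2
    have hp : p < v.length - 1 := by rw [h.1] at hp1; exact hp1
    have := h.2 p hp
    have hmin : min (v.length - 1) (v.length - 1 - p) = v.length - 1 - p := by omega
    rw [hmin] at this
    rw [← List.getD_eq_getElem _ 0, this]
    simp

-- ===== VERDICT (by name: the statement is the Claim_ definition above) =====
theorem correlacion_corta_spec : Claim_equal_correlacion_corta := by
  intro v _
  show correlacion_corta v = correlacion_corta_alt v
  rw [pvPortA_eq_map, pvPortB_eq_map]
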